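-- pv_equiv track=rewrite | github.com/emleda/usyd_info1110 | input_parser.py | valid_receiver_symbol
-- ===== SOURCE A (Python) =====
-- def valid_receiver_symbol(symbol):
--     accepted = ['R0', 'R1', 'R2', 'R3', 'R4', 'R5', 'R6', 'R7', 'R8', 'R9']
--     i = 0
--     while i < len(accepted):
--         if symbol == accepted[i]:
--             return True
--         else:
--             i += 1
--     return False
-- ===== SOURCE B (Python) =====
-- def valid_receiver_symbol(symbol):
--     return (isinstance(symbol, str) and len(symbol) == 2
--             and symbol[0] == 'R' and '0' <= symbol[1] <= '9')
-- ===== Notes on version B (the rewrite author's own statement) =====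
-- stated objective: idiomatic
-- what changed: Replaces the index-driven membership scan over the ten literal receiver strings with a structural predicate: length two, first character the receiver prefix letter, second character a decimal digit.
import Mathlib
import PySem

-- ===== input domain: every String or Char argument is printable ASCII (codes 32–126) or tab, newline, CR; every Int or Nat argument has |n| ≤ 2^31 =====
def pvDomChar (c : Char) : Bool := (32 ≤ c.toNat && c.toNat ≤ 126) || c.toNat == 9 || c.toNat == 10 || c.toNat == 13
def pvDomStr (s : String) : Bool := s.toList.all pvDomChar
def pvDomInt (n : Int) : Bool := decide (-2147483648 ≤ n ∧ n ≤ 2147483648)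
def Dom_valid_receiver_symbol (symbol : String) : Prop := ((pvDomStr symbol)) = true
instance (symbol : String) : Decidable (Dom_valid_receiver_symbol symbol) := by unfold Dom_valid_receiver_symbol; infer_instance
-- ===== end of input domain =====

-- B replaces the index-driven scan over the ten literal receiver strings with a structural check
-- (length two, prefix letter, decimal-digit second character); objective: more idiomatic, same behaviour.
-- ===== PORT A =====
-- loop 'while i < len(accepted): if symbol == accepted[i]: return True else i += 1'
def vrsScan (symbol : String) : List String → Bool
  | [] => false
  | a :: rest => if symbol == a then true else vrsScan symbol rest

def valid_receiver_symbol (symbol : String) : Bool :=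
  vrsScan symbol ["R0", "R1", "R2", "R3", "R4", "R5", "R6", "R7", "R8", "R9"]

-- ===== PORT B =====
-- B: len(symbol) == 2 and symbol[0] == 'R' and '0' <= symbol[1] <= '9'
def valid_receiver_symbol_alt (symbol : String) : Bool :=
  match symbol.toList with
  | [c0, c1] => c0 == 'R' && decide ('0' ≤ c1) && decide (c1 ≤ '9')
  | _ => false

-- ===== PRECONDITION & SPEC =====
def Spec_valid_receiver_symbol (symbol : String) (out : Bool) : Prop := out = valid_receiver_symbol_alt symbol
instance (symbol : String) (out : Bool) : Decidable (Spec_valid_receiver_symbol symbol out) := by unfold Spec_valid_receiver_symbol; infer_instance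

-- ===== CLAIM (what is proved, stated in full; the proofs are below) =====
def Claim_equal_valid_receiver_symbol : Prop := ∀ (symbol : String), Dom_valid_receiver_symbol symbol → Spec_valid_receiver_symbol symbol (valid_receiver_symbol symbol)

-- ===== LEMMAS AND PROOFS =====

-- ===== VERDICT (by name: the statement is the Claim_ definition above) =====
lemma beq_toList (s t : String) : (s == t) = (s.toList == t.toList) := by
  simp [String.toList_inj]

lemma vrsScan_any (symbol : String) (l : List String) :
    vrsScan symbol l = l.any (fun a => symbol == a) := by
  induction l with
  | nil => rfl
  | cons a rest ih =>
    rw [List.any_cons, ← ih,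
      show vrsScan symbol (a :: rest) = (if symbol == a then true else vrsScan symbol rest) from rfl]
    by_cases h : (symbol == a) = true
    · rw [if_pos h, h, Bool.true_or]
    · rw [if_neg h, Bool.eq_false_iff.mpr h, Bool.false_or]

lemma digit_cases (c : Char) : ('0' ≤ c ∧ c ≤ '9') ↔
    (c = '0' ∨ c = '1' ∨ c = '2' ∨ c = '3' ∨ c = '4' ∨
     c = '5' ∨ c = '6' ∨ c = '7' ∨ c = '8' ∨ c = '9') := by
  constructor
  · rintro ⟨h0, h9⟩
    simp only [Char.le_def, UInt32.le_iff_toNat_le] at h0 h9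
    have e0 : ('0' : Char).val.toNat = 48 := rfl
    have e9 : ('9' : Char).val.toNat = 57 := rfl
    rw [e0] at h0; rw [e9] at h9
    have key : ∀ n : Nat, c.val.toNat = n → ∀ d : Char, d.val.toNat = n → c = d := by
      intro n hn d hd; exact Char.ext (UInt32.toNat_inj.mp (hn.trans hd.symm))
    interval_cases h : c.val.toNat
    · exact Or.inl (key 48 rfl '0' rfl)
    · exact Or.inr (Or.inl (key 49 rfl '1' rfl))
    · exact Or.inr (Or.inr (Or.inl (key 50 rfl '2' rfl)))
    · exact Or.inr (Or.inr (Or.inr (Or.inl (key 51 rfl '3' rfl))))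
    · exact Or.inr (Or.inr (Or.inr (Or.inr (Or.inl (key 52 rfl '4' rfl)))))
    · exact Or.inr (Or.inr (Or.inr (Or.inr (Or.inr (Or.inl (key 53 rfl '5' rfl))))))
    · exact Or.inr (Or.inr (Or.inr (Or.inr (Or.inr (Or.inr (Or.inl (key 54 rfl '6' rfl)))))))
    · exact Or.inr (Or.inr (Or.inr (Or.inr (Or.inr (Or.inr (Or.inr (Or.inl (key 55 rfl '7' rfl))))))))
    · exact Or.inr (Or.inr (Or.inr (Or.inr (Or.inr (Or.inr (Or.inr (Or.inr (Or.inl (key 56 rfl '8' rfl)))))))))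
    · exact Or.inr (Or.inr (Or.inr (Or.inr (Or.inr (Or.inr (Or.inr (Or.inr (Or.inr (key 57 rfl '9' rfl)))))))))
  · rintro (rfl|rfl|rfl|rfl|rfl|rfl|rfl|rfl|rfl|rfl) <;> exact ⟨by decide, by decide⟩

theorem valid_receiver_symbol_spec : Claim_equal_valid_receiver_symbol := by
  intro symbol _
  unfold Spec_valid_receiver_symbol valid_receiver_symbol valid_receiver_symbol_alt
  rw [vrsScan_any]
  simp only [List.any_cons, List.any_nil, beq_toList, Bool.or_false]
  rcases h : symbol.toList with _ | ⟨c0, _ | ⟨c1, _ | ⟨c2, rest⟩⟩⟩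
  · decide
  · simp
  · by_cases h0 : c0 = 'R'
    · subst h0
      by_cases h1 : ('0' ≤ c1 ∧ c1 ≤ '9')
      · have := (digit_cases c1).mp h1
        rcases this with rfl|rfl|rfl|rfl|rfl|rfl|rfl|rfl|rfl|rfl <;> simp [h1.1, h1.2]
      · have hd := (digit_cases c1).not.mp h1
        simp only [not_or] at hd
        rw [Decidable.not_and_iff_not_or_not] at h1
        rcases h1 with h1 | h1 <;>
          simp [hd.1, hd.2.1, hd.2.2.1, hd.2.2.2.1, hd.2.2.2.2.1, hd.2.2.2.2.2.1,
            hd.2.2.2.2.2.2.1, hd.2.2.2.2.2.2.2.1, hd.2.2.2.2.2.2.2.2, h1]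
    · have hb : (c0 == 'R') = false := by simp [h0]
      simp [hb]
  · simp
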